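-- pv_equiv track=rewrite | github.com/Abdullahyassir007/audio-watermarking-demo | audio-stegno-main/decoder.py | reverse_bit_interleaving
-- ===== SOURCE A (Python) =====
-- def reverse_bit_interleaving(interleaved_bits, block_size=8):
--     """Reverse the bit interleaving process"""
--     n = len(interleaved_bits)
--     padded_length = ((n + block_size - 1) // block_size) * block_size
--     padded_bits = interleaved_bits + [0] * (padded_length - n)
--
--     num_blocks = padded_length // block_size
--     # Forward interleave: output[i * num_blocks + b] = input[b * block_size + i]
--     # So reverse: original[b * block_size + i] = interleaved[i * num_blocks + b]
--     original = [0] * padded_length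
--     for i in range(block_size):
--         for b in range(num_blocks):
--             original[b * block_size + i] = padded_bits[i * num_blocks + b]
--
--     return original[:n]
-- ===== SOURCE B (Python) =====
-- def reverse_bit_interleaving(interleaved_bits, block_size=8):
--     """Reverse the bit interleaving by dealing the stream round-robin into
--     num_blocks accumulating buckets (one pass), then concatenating the buckets."""
--     n = len(interleaved_bits)
--     num_blocks = -(-n // block_size)          # ceil(n / block_size)
--     if num_blocks == 0:
--         return []
--     buckets = [[] for _ in range(num_blocks)]
--     for t, bit in enumerate(interleaved_bits + [0] * (block_size * num_blocks - n)):
--         buckets[t % num_blocks].append(bit)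
--     original = []
--     for bucket in buckets:
--         original.extend(bucket)
--     return original[:n]
-- ===== Notes on version B (the rewrite author's own statement) =====
-- stated objective: alternative
-- what changed: Replaces A's preallocated output array filled by a nested index-arithmetic scatter (original[b*block_size+i] = padded[i*num_blocks+b]) with a single left-to-right pass that deals the padded stream round-robin (index mod num_blocks) into num_blocks accumulating buckets and then concatenates the buckets.
-- outside the precondition, e.g. on reverse_bit_interleaving([1, 0, 1, 1, 0, 1, 0, 0, 1, 1], -2): A returns [0, 0, 0, 0, 0, 0, 0, 0], B raises IndexError; on reverse_bit_interleaving([1, 0], -5): A returns [], B returns []; on reverse_bit_interleaving([1, 0, 1], 0): A raises ZeroDivisionError, B raises ZeroDivisionError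
import Mathlib
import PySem

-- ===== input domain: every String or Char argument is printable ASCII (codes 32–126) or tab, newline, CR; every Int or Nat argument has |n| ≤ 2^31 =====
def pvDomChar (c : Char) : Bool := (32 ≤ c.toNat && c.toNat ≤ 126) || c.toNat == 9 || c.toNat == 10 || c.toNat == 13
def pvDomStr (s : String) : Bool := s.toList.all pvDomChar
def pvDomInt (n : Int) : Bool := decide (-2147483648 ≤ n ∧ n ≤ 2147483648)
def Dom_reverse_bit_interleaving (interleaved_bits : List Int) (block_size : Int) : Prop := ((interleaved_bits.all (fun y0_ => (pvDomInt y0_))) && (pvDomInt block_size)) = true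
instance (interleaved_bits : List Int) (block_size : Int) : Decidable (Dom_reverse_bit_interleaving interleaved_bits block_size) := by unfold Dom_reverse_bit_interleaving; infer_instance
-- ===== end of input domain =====

-- B de-interleaves by a single pass that deals the padded stream round-robin into num_blocks
-- accumulating buckets and concatenates them, instead of A's nested index-arithmetic scatter
-- into a preallocated array (objective: alternative decomposition, same cost).

-- ===== PORT A =====
-- Python `[0] * t` is empty for t ≤ 0: `List.replicate t.toNat 0` is exact.
-- Python's mutable list `original` is ported as `Array Int` (element-wise assignment in O(1));
-- under Pre_ every written index b*block_size+i and read index i*num_blocks+b is nonnegative and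
-- in range, so `setIfInBounds`/`getD` with `.toNat` are exact for `original[...] = padded_bits[...]`.
def reverse_bit_interleaving (interleaved_bits : List Int) (block_size : Int) : List Int :=
  let n : Int := PySem.List.len interleaved_bits
  let padded_length : Int := PySem.Int.floordiv (n + block_size - 1) block_size * block_size
  let padded_bits : Array Int :=
    (interleaved_bits ++ List.replicate (padded_length - n).toNat 0).toArray
  let num_blocks : Int := PySem.Int.floordiv padded_length block_size
  let original : Array Int := Array.replicate padded_length.toNat 0
  let original :=
    (PySem.List.pyRange 0 block_size 1).foldl (fun acc i =>
      (PySem.List.pyRange 0 num_blocks 1).foldl (fun acc2 b =>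
        acc2.setIfInBounds (b * block_size + i).toNat
          (padded_bits.getD (i * num_blocks + b).toNat 0)) acc) original
  PySem.List.slice original.toList none (some n)

-- ===== PORT B =====
-- Python's `buckets` (a list of lists mutated by .append) is ported as Array (Array Int) with
-- Array.modify/push; `enumerate` is List.zipIdx ((element, index) pairs, same traversal);
-- under Pre_ every bucket index t % num_blocks is in range, so `modify` is exact for
-- `buckets[t % num_blocks].append(bit)`.
def reverse_bit_interleaving_alt (interleaved_bits : List Int) (block_size : Int) : List Int :=
  let n : Int := PySem.List.len interleaved_bits
  let num_blocks : Int := -(PySem.Int.floordiv (-n) block_size)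
  if num_blocks = 0 then []
  else
    let padded : List Int :=
      interleaved_bits ++ List.replicate (block_size * num_blocks - n).toNat 0
    let buckets : Array (Array Int) := Array.replicate num_blocks.toNat #[]
    let buckets := padded.zipIdx.foldl
      (fun bs p => bs.modify (PySem.Int.mod (p.2 : Int) num_blocks).toNat (·.push p.1)) buckets
    let original : List Int := buckets.toList.foldl (fun acc bucket => acc ++ bucket.toList) []
    PySem.List.slice original none (some n)

-- ===== PRECONDITION & SPEC =====
-- Pre_ restricts to the natural domain of a block size: positive. A raises ZeroDivisionError at
-- block_size = 0; for negative block sizes A's value (an all-zero or empty list produced by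
-- loops that never execute) is an accident of its implementation which B does not reproduce
-- (B raises IndexError there, except on inputs shorter than |block_size| where both return []).
def Pre_reverse_bit_interleaving (interleaved_bits : List Int) (block_size : Int) : Prop :=
  0 < block_size
instance (interleaved_bits : List Int) (block_size : Int) : Decidable (Pre_reverse_bit_interleaving interleaved_bits block_size) := by unfold Pre_reverse_bit_interleaving; infer_instance

def pvWitness_reverse_bit_interleaving : List Int × Int := ([1, 0, 1, 1, 0, 1], 2)

def Spec_reverse_bit_interleaving (interleaved_bits : List Int) (block_size : Int) (out : List Int) : Prop := out = reverse_bit_interleaving_alt interleaved_bits block_size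
instance (interleaved_bits : List Int) (block_size : Int) (out : List Int) : Decidable (Spec_reverse_bit_interleaving interleaved_bits block_size out) := by unfold Spec_reverse_bit_interleaving; infer_instance

-- ===== CLAIM (what is proved, stated in full; the proofs are below) =====
def Claim_equal_reverse_bit_interleaving : Prop := ∀ (interleaved_bits : List Int) (block_size : Int), Dom_reverse_bit_interleaving interleaved_bits block_size → Pre_reverse_bit_interleaving interleaved_bits block_size → Spec_reverse_bit_interleaving interleaved_bits block_size (reverse_bit_interleaving interleaved_bits block_size)

-- ===== LEMMAS AND PROOFS =====

-- Proof-side Nat model of A's double loop, shown equal to `pvTarget`.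
def pvInnerT (padded : List Int) (k m i t : Nat) (acc : List Int) : List Int :=
  (List.range t).foldl (fun a b => a.set (b * k + i) (padded.getD (i * m + b) 0)) acc

def pvOuterT (padded : List Int) (k m s : Nat) (acc : List Int) : List Int :=
  (List.range s).foldl (fun acc i => pvInnerT padded k m i m acc) acc

def pvTarget (padded : List Int) (k m : Nat) : List Int :=
  (List.range (m * k)).map (fun j => padded.getD ((j % k) * m + j / k) 0)

lemma pvFoldlSet_length {β : Type} (l : List β) (f : β → Nat) (g : β → Int) (acc : List Int) :
    (l.foldl (fun a x => a.set (f x) (g x)) acc).length = acc.length := by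
  induction l generalizing acc with
  | nil => rfl
  | cons x t ih => simp [List.foldl_cons, ih]

lemma pvInnerT_length (padded : List Int) (k m i t : Nat) (acc : List Int) :
    (pvInnerT padded k m i t acc).length = acc.length :=
  pvFoldlSet_length _ _ _ _

lemma pvGetD_set (xs : List Int) (p : Nat) (v : Int) (j : Nat) :
    (xs.set p v).getD j 0 = if p = j ∧ p < xs.length then v else xs.getD j 0 := by
  rw [List.getD_eq_getElem?_getD, List.getD_eq_getElem?_getD, List.getElem?_set]
  by_cases h1 : p = j
  · subst h1
    by_cases h2 : p < xs.length
    · simp [h2]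
    · simp [h2]
  · simp [h1]

lemma pvInnerT_getD (padded : List Int) (k m i t : Nat) (hik : i < k) (htm : t ≤ m)
    (acc : List Int) (hlen : acc.length = m * k) (j : Nat) :
    (pvInnerT padded k m i t acc).getD j 0 =
      if j % k = i ∧ j / k < t then padded.getD (i * m + j / k) 0 else acc.getD j 0 := by
  induction t with
  | zero => simp [pvInnerT]
  | succ t ih =>
    have htm' : t ≤ m := Nat.le_of_succ_le htm
    have hk : 0 < k := by omega
    rw [pvInnerT, List.range_succ, List.foldl_append, List.foldl_cons, List.foldl_nil]
    have hlen' : (pvInnerT padded k m i t acc).length = m * k := by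
      rw [pvInnerT_length, hlen]
    rw [show (List.range t).foldl
          (fun a b => a.set (b * k + i) (padded.getD (i * m + b) 0)) acc
        = pvInnerT padded k m i t acc from rfl]
    rw [pvGetD_set, hlen', ih htm']
    have hidx : t * k + i < m * k := by
      calc t * k + i < t * k + k := by omega
        _ = (t + 1) * k := by ring
        _ ≤ m * k := Nat.mul_le_mul_right k htm
    have hdm := Nat.div_add_mod j k
    by_cases hj : t * k + i = j
    · have hmod : j % k = i := by
        rw [← hj, Nat.mul_comm t k, Nat.mul_add_mod, Nat.mod_eq_of_lt hik]
      have hdiv : j / k = t := by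
        rw [← hj, Nat.mul_comm t k, Nat.mul_add_div hk, Nat.div_eq_of_lt hik]
        omega
      rw [if_pos ⟨hj, hidx⟩, if_pos (⟨hmod, by omega⟩ : j % k = i ∧ j / k < t + 1), hdiv]
    · have hne : ¬ (j % k = i ∧ j / k = t) := by
        rintro ⟨ha, hb⟩
        apply hj
        rw [← hdm, ha, hb, Nat.mul_comm]
      rw [if_neg (fun h => hj h.1)]
      split_ifs with hc1 hc2 hc2
      · rfl
      · exact absurd ⟨hc1.1, by omega⟩ hc2
      · exact absurd ⟨hc2.1, by omega⟩ hne
      · rfl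

lemma pvOuterT_length (padded : List Int) (k m s : Nat) (acc : List Int) :
    (pvOuterT padded k m s acc).length = acc.length := by
  induction s generalizing acc with
  | zero => rfl
  | succ s ih =>
    rw [pvOuterT, List.range_succ, List.foldl_append, List.foldl_cons, List.foldl_nil]
    rw [show (List.range s).foldl (fun acc i => pvInnerT padded k m i m acc) acc
        = pvOuterT padded k m s acc from rfl]
    rw [pvInnerT_length, ih]

lemma pvOuterT_getD (padded : List Int) (k m s : Nat) (_hk : 0 < k) (hs : s ≤ k) (j : Nat) :
    (pvOuterT padded k m s (List.replicate (m * k) 0)).getD j 0 =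
      if j % k < s ∧ j / k < m then padded.getD ((j % k) * m + j / k) 0 else 0 := by
  induction s with
  | zero => simp [pvOuterT]
  | succ s ih =>
    have hs' : s ≤ k := Nat.le_of_succ_le hs
    rw [pvOuterT, List.range_succ, List.foldl_append, List.foldl_cons, List.foldl_nil]
    rw [show (List.range s).foldl (fun acc i => pvInnerT padded k m i m acc)
          (List.replicate (m * k) 0) = pvOuterT padded k m s (List.replicate (m * k) 0) from rfl]
    rw [pvInnerT_getD padded k m s m (by omega) le_rfl _
        (by rw [pvOuterT_length, List.length_replicate]) j, ih hs']
    by_cases hm : j / k < m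
    · by_cases hc : j % k = s
      · rw [if_pos ⟨hc, hm⟩, if_pos (⟨by omega, hm⟩ : j % k < s + 1 ∧ j / k < m), hc]
      · rw [if_neg (fun h => hc h.1)]
        by_cases hlt : j % k < s
        · rw [if_pos ⟨hlt, hm⟩, if_pos (⟨by omega, hm⟩ : j % k < s + 1 ∧ j / k < m)]
        · rw [if_neg (fun h => hlt h.1),
            if_neg (fun h => absurd h.1 (by omega) : ¬ (j % k < s + 1 ∧ j / k < m))]
    · rw [if_neg (fun h => hm h.2), if_neg (fun h => hm h.2), if_neg (fun h => hm h.2)]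

lemma pvOuterT_eq_target (padded : List Int) (k m : Nat) (hk : 0 < k) :
    pvOuterT padded k m k (List.replicate (m * k) 0) = pvTarget padded k m := by
  apply List.ext_getElem
  · rw [pvOuterT_length, List.length_replicate, pvTarget, List.length_map, List.length_range]
  · intro j h1 h2
    have hjmk : j < m * k := by
      rw [pvOuterT_length, List.length_replicate] at h1; exact h1
    rw [← List.getD_eq_getElem _ 0 h1, ← List.getD_eq_getElem _ 0 h2,
      pvOuterT_getD padded k m k hk le_rfl j,
      if_pos (⟨Nat.mod_lt j hk, (Nat.div_lt_iff_lt_mul hk).mpr hjmk⟩ : j % k < k ∧ j / k < m)]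
    have hmap : (pvTarget padded k m).getD j 0 = padded.getD ((j % k) * m + j / k) 0 := by
      rw [pvTarget, List.getD_eq_getElem?_getD, List.getElem?_map, List.getElem?_range hjmk]
      rfl
    rw [hmap]

-- Array.getD reads the underlying list
lemma pvArrGetD (a : Array Int) (i : Nat) (d : Int) : a.getD i d = a.toList.getD i d := by
  unfold Array.getD
  split
  · rw [List.getD_eq_getElem _ _ (by simpa using ‹_›)]
    simp
  · rw [List.getD_eq_default _ _ (by simpa using Nat.le_of_not_lt ‹_›)]

-- the Int-indexed double loop of port A is the Nat model on the underlying list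
lemma pvBridge_inner (padded : List Int) (k m i : Nat) (acc : Array Int) :
    ((PySem.List.pyRange 0 (m : Int) 1).foldl (fun a b =>
        a.setIfInBounds (b * (k : Int) + (i : Int)).toNat
          (padded.toArray.getD ((i : Int) * (m : Int) + b).toNat 0)) acc).toList =
      pvInnerT padded k m i m acc.toList := by
  rw [PySem.List.pyRange_zero_natCast m, List.foldl_map, pvInnerT]
  refine (List.foldl_hom Array.toList ?_).symm
  intro x b
  symm
  rw [show ((b : Int) * (k : Int) + (i : Int)) = ((b * k + i : Nat) : Int) by push_cast; ring,
    show ((i : Int) * (m : Int) + (b : Int)) = ((i * m + b : Nat) : Int) by push_cast; ring,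
    Int.toNat_natCast, Int.toNat_natCast, Array.toList_setIfInBounds, pvArrGetD,
    List.toList_toArray]

lemma pvBridge_outer (padded : List Int) (k m : Nat) (acc : Array Int) :
    ((PySem.List.pyRange 0 (k : Int) 1).foldl (fun acc i =>
        (PySem.List.pyRange 0 (m : Int) 1).foldl (fun a b =>
          a.setIfInBounds (b * (k : Int) + i).toNat
            (padded.toArray.getD (i * (m : Int) + b).toNat 0)) acc) acc).toList =
      pvOuterT padded k m k acc.toList := by
  rw [PySem.List.pyRange_zero_natCast k, List.foldl_map, pvOuterT]
  refine (List.foldl_hom Array.toList ?_).symm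
  intro x i
  exact (pvBridge_inner padded k m i x).symm

lemma portA_eq (bits : List Int) (k m : Nat) (hk : 0 < k)
    (hq : PySem.Int.floordiv ((bits.length : Int) + (k : Int) - 1) (k : Int) = (m : Int)) :
    reverse_bit_interleaving bits (k : Int) =
      (pvTarget (bits ++ List.replicate (m * k - bits.length) 0) k m).take bits.length := by
  simp only [reverse_bit_interleaving, PySem.List.len_eq, hq]
  have hmul : ((m : Int) * (k : Int)) = ((m * k : Nat) : Int) := by push_cast; ring
  have hnb : PySem.Int.floordiv ((m : Int) * (k : Int)) (k : Int) = (m : Int) := by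
    rw [hmul, PySem.Int.floordiv_natCast, Nat.mul_div_cancel m hk]
  rw [hnb]
  have hrep : ((m : Int) * (k : Int) - (bits.length : Int)).toNat = m * k - bits.length := by
    omega
  have hrep2 : ((m : Int) * (k : Int)).toNat = m * k := by omega
  rw [hrep, hrep2, pvBridge_outer, Array.toList_replicate, pvOuterT_eq_target _ _ _ hk,
    PySem.List.slice_to _ (by positivity), Int.toNat_natCast]

-- ---------- B side: round-robin dealing ----------

-- Proof-side Nat model of B's dealing loop.
def pvDeal (padded : List Int) (m : Nat) (l : List Nat) (bs : Array (Array Int)) :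
    Array (Array Int) :=
  l.foldl (fun bs t => bs.modify (t % m) (·.push (padded.getD t 0))) bs

lemma pvDeal_size (padded : List Int) (m : Nat) (l : List Nat) (bs : Array (Array Int)) :
    (pvDeal padded m l bs).size = bs.size := by
  induction l generalizing bs with
  | nil => rfl
  | cons t l ih => simp [pvDeal, List.foldl_cons] at ih ⊢; rw [ih, Array.size_modify]

lemma pvGetD_modify (a : Array (Array Int)) (i b : Nat) (f : Array Int → Array Int) :
    (a.modify i f).getD b #[] = if b = i ∧ b < a.size then f (a.getD b #[]) else a.getD b #[] := by
  rw [Array.getD_eq_getD_getElem?, Array.getElem?_modify, Array.getD_eq_getD_getElem?]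
  by_cases hb : b < a.size
  · rw [Array.getElem?_eq_getElem hb]
    by_cases he : b = i
    · subst he
      simp [hb]
    · rw [if_neg (fun h => he h.symm), if_neg (fun h => he h.1), Option.getD_some]
  · have h0 : a[b]? = none := Array.getElem?_eq_none (by omega)
    rw [h0]
    simp [hb]

lemma pvZipIdx_eq (l : List Int) :
    l.zipIdx = (List.range l.length).map (fun t => (l.getD t 0, t)) := by
  apply List.ext_getElem
  · simp
  · intro j h1 h2
    have hj : j < l.length := by simpa using h1
    simp [List.getElem_zipIdx, List.getD_eq_getElem?_getD, List.getElem?_eq_getElem hj]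

-- one full round of dealing starting at a multiple of m pushes one element onto each bucket b < j
lemma pvDeal_round (padded : List Int) (m s : Nat) (hs : s % m = 0) (j : Nat) (hj : j ≤ m)
    (bs : Array (Array Int)) (hsize : bs.size = m) (b : Nat) (hb : b < m) :
    (pvDeal padded m ((List.range j).map (fun r => s + r)) bs).getD b #[] =
      if b < j then (bs.getD b #[]).push (padded.getD (s + b) 0) else bs.getD b #[] := by
  induction j with
  | zero => simp [pvDeal]
  | succ j ih =>
    have hj' : j ≤ m := Nat.le_of_succ_le hj
    rw [List.range_succ, List.map_append, pvDeal, List.foldl_append]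
    rw [show (((List.range j).map (fun r => s + r)).foldl
          (fun bs t => bs.modify (t % m) (·.push (padded.getD t 0))) bs)
        = pvDeal padded m ((List.range j).map (fun r => s + r)) bs from rfl]
    simp only [List.map_cons, List.map_nil, List.foldl_cons, List.foldl_nil]
    have hmod : (s + j) % m = j := by
      rw [Nat.add_mod, hs, Nat.zero_add, Nat.mod_mod_of_dvd, Nat.mod_eq_of_lt (by omega)]
      exact dvd_refl m
    rw [hmod, pvGetD_modify, pvDeal_size, hsize, ih hj']
    by_cases hbj : b = j
    · subst hbj
      rw [if_pos ⟨rfl, hb⟩, if_neg (by omega), if_pos (by omega)]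
    · rw [if_neg (fun h => hbj h.1)]
      by_cases hlt : b < j
      · rw [if_pos hlt, if_pos (by omega)]
      · rw [if_neg hlt, if_neg (by omega)]

lemma pvDeal_blocks (padded : List Int) (m : Nat) (K : Nat) (b : Nat) (hb : b < m) :
    (pvDeal padded m (List.range (K * m)) (Array.replicate m #[])).getD b #[] =
      ((List.range K).map (fun i => padded.getD (i * m + b) 0)).toArray := by
  induction K with
  | zero => simp [pvDeal, Array.getD, hb]
  | succ K ih =>
    have hsplit : List.range ((K + 1) * m) =
        List.range (K * m) ++ (List.range m).map (fun r => K * m + r) := by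
      rw [show (K + 1) * m = K * m + m by ring, List.range_add]
    rw [hsplit, pvDeal, List.foldl_append]
    rw [show ((List.range (K * m)).foldl
          (fun bs t => bs.modify (t % m) (·.push (padded.getD t 0))) (Array.replicate m #[]))
        = pvDeal padded m (List.range (K * m)) (Array.replicate m #[]) from rfl]
    rw [show (((List.range m).map (fun r => K * m + r)).foldl
          (fun bs t => bs.modify (t % m) (·.push (padded.getD t 0)))
          (pvDeal padded m (List.range (K * m)) (Array.replicate m #[])))
        = pvDeal padded m ((List.range m).map (fun r => K * m + r))
            (pvDeal padded m (List.range (K * m)) (Array.replicate m #[])) from rfl]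
    rw [pvDeal_round padded m (K * m) (Nat.mul_mod_left K m) m le_rfl _
        (by rw [pvDeal_size, Array.size_replicate]) b hb, if_pos hb, ih]
    rw [List.range_succ, List.map_append, List.map_cons, List.map_nil]
    simp [List.push_toArray]

lemma pvToList_eq_map_getD (bs : Array (Array Int)) :
    bs.toList = (List.range bs.size).map (fun b => bs.getD b #[]) := by
  apply List.ext_getElem
  · simp
  · intro j h1 h2
    have hj : j < bs.size := by simpa using h1
    simp [Array.getD, hj]

lemma pvFoldlAppend (l : List (Array Int)) (acc : List Int) :
    l.foldl (fun a bk => a ++ bk.toList) acc = acc ++ (l.map Array.toList).flatten := by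
  induction l generalizing acc with
  | nil => simp
  | cons x t ih => simp [List.foldl_cons, ih]

-- flattening m columns of height k enumerates j < m*k with i = j % k, b = j / k
lemma pvFlattenCols (g : Nat → Nat → Int) (k m : Nat) (hk : 0 < k) :
    ((List.range m).map (fun b => (List.range k).map (fun i => g i b))).flatten =
      (List.range (m * k)).map (fun j => g (j % k) (j / k)) := by
  induction m with
  | zero => simp
  | succ m ih =>
    rw [List.range_succ, List.map_append, List.flatten_append, ih]
    rw [show (m + 1) * k = m * k + k by ring, List.range_add, List.map_append]
    congr 1
    simp only [List.map_cons, List.map_nil, List.flatten_cons, List.flatten_nil, List.append_nil]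
    rw [List.map_map]
    apply List.map_congr_left
    intro i hi
    have hik : i < k := List.mem_range.mp hi
    simp only [Function.comp_apply]
    have h1 : (m * k + i) % k = i := by
      rw [Nat.add_comm, Nat.add_mul_mod_self_right, Nat.mod_eq_of_lt hik]
    have h2 : (m * k + i) / k = m := by
      rw [Nat.add_comm, Nat.add_mul_div_right _ _ hk, Nat.div_eq_of_lt hik, Nat.zero_add]
    rw [h1, h2]

lemma portB_eq (bits : List Int) (k m : Nat) (hk : 0 < k)
    (hnm : bits.length ≤ m * k)
    (hq : -(PySem.Int.floordiv (-(bits.length : Int)) (k : Int)) = (m : Int)) :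
    reverse_bit_interleaving_alt bits (k : Int) =
      (pvTarget (bits ++ List.replicate (m * k - bits.length) 0) k m).take bits.length := by
  simp only [reverse_bit_interleaving_alt, PySem.List.len_eq, hq]
  by_cases hm : m = 0
  · subst hm
    have hb0 : bits.length = 0 := by omega
    have hbits : bits = [] := List.length_eq_zero_iff.mp hb0
    simp [hbits, pvTarget]
  · rw [if_neg (by exact_mod_cast hm)]
    have hm0 : 0 < m := Nat.pos_of_ne_zero hm
    set n := bits.length with hndef
    have hrep : ((k : Int) * (m : Int) - (n : Int)).toNat = m * k - n := by
      have : ((k : Int) * (m : Int)) = ((m * k : Nat) : Int) := by push_cast; ring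
      omega
    rw [hrep]
    set padded := bits ++ List.replicate (m * k - n) 0 with hpadded
    have hpl : padded.length = m * k := by
      simp only [hpadded, List.length_append, List.length_replicate]
      omega
    rw [pvZipIdx_eq, List.foldl_map, hpl]
    have hfun : (fun (bs : Array (Array Int)) (t : Nat) =>
          bs.modify (PySem.Int.mod ((t : Nat) : Int) (m : Int)).toNat
            (·.push (padded.getD t 0)))
        = fun bs t => bs.modify (t % m) (·.push (padded.getD t 0)) := by
      funext bs t
      rw [PySem.Int.mod_natCast, Int.toNat_natCast]
    rw [Int.toNat_natCast, hfun,
      show ((List.range (m * k)).foldl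
          (fun bs t => bs.modify (t % m) (·.push (padded.getD t 0)))
          (Array.replicate m #[]))
        = pvDeal padded m (List.range (m * k)) (Array.replicate m #[]) from rfl]
    have hmk : m * k = k * m := Nat.mul_comm m k
    rw [pvToList_eq_map_getD, pvDeal_size, Array.size_replicate, pvFoldlAppend,
      List.nil_append, List.map_map]
    have hcols : (List.range m).map
          (Array.toList ∘ fun b =>
            (pvDeal padded m (List.range (m * k)) (Array.replicate m #[])).getD b #[]) =
        (List.range m).map (fun b => (List.range k).map (fun i => padded.getD (i * m + b) 0)) := by
      apply List.map_congr_left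
      intro b hb
      have hbm : b < m := List.mem_range.mp hb
      simp only [Function.comp_apply]
      rw [hmk, pvDeal_blocks padded m k b hbm, List.toList_toArray]
    rw [hcols, pvFlattenCols (fun i b => padded.getD (i * m + b) 0) k m hk,
      PySem.List.slice_to _ (by positivity), Int.toNat_natCast]
    rfl

-- ===== VERDICT (by name: the statement is the Claim_ definition above) =====
theorem reverse_bit_interleaving_spec : Claim_equal_reverse_bit_interleaving := by
  intro bits bs _hDom hPre
  unfold Pre_reverse_bit_interleaving at hPre
  unfold Spec_reverse_bit_interleaving
  set k := bs.toNat with hkdef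
  have hbs : bs = (k : Int) := by omega
  have hk : 0 < k := by omega
  set n := bits.length with hndef
  set q := PySem.Int.floordiv ((n : Int) + bs - 1) bs with hqdef
  obtain ⟨h1, h2⟩ := (PySem.Int.floordiv_eq_iff_of_pos hPre).mp hqdef.symm
  have hn0 : (0 : Int) ≤ (n : Int) := Int.natCast_nonneg n
  have hq0 : 0 ≤ q := by
    by_contra h
    have hle : (q + 1) * bs ≤ 0 :=
      mul_nonpos_of_nonpos_of_nonneg (by omega) (le_of_lt hPre)
    linarith
  set m := q.toNat with hmdef
  have hqm : q = (m : Int) := by omega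
  have hexp : (q + 1) * bs = q * bs + bs := by ring
  have hexp2 : (q - 1) * bs = q * bs - bs := by ring
  have hcast : q * bs = ((m * k : Nat) : Int) := by rw [hqm, hbs]; push_cast; ring
  have hnmk : (n : Int) ≤ ((m * k : Nat) : Int) := by linarith
  have hnm : n ≤ m * k := by exact_mod_cast hnmk
  have hqB : -(PySem.Int.floordiv (-(n : Int)) bs) = q := by
    rw [PySem.Int.neg_floordiv_neg_eq_iff_of_pos hPre]
    constructor <;> linarith
  have hA : PySem.Int.floordiv ((n : Int) + (k : Int) - 1) (k : Int) = (m : Int) := by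
    rw [hbs, hqm] at hqdef
    exact hqdef.symm
  have hB : -(PySem.Int.floordiv (-(n : Int)) (k : Int)) = (m : Int) := by
    rw [hbs, hqm] at hqB
    exact hqB
  rw [hbs, portA_eq bits k m hk hA, portB_eq bits k m hk hnm hB]
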